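-- pv_equiv track=rewrite | github.com/prabhat1081/Automated-Fact-Checking | codes_json/extractors/reporting.py | isPromise
-- ===== SOURCE A (Python) =====
-- best_promise_words = ['proposed', 'promised', 'threatened', 'guaranteed', 'sweared']
--
-- said_words = ['told', 'said']
--
-- def isPromise(sentence):
-- 	sentence = sentence.lower().strip().split(' ')
-- 	pos = -1
-- 	i = 0
-- 	for word in sentence:
-- 		if word in best_promise_words+said_words:
-- 			pos = i
-- 		i+=1
-- 	if pos == -1:
-- 		return False
-- 	sentence = sentence[pos:]
-- 	if ('to' in sentence) or ('that' in sentence) or ('would' in sentence):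
-- 		return True
-- 	return False
-- ===== SOURCE B (Python) =====
-- best_promise_words = ['proposed', 'promised', 'threatened', 'guaranteed', 'sweared']
--
-- said_words = ['told', 'said']
--
-- def isPromise(sentence):
--     keywords = set(best_promise_words) | set(said_words)
--     connectors = {'to', 'that', 'would'}
--     seen_connector = False
--     for word in reversed(sentence.lower().strip().split(' ')):
--         if word in connectors:
--             seen_connector = True
--         if word in keywords:
--             return seen_connector
--     return False
-- ===== Notes on version B (the rewrite author's own statement) =====
-- stated objective: alternative
-- what changed: A finds the last promise/said-keyword index in one forward pass and then scans the whole suffix from that index for a connector word; B does a single right-to-left scan that tracks whether a connector has been seen and returns immediately at the first keyword met.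
import Mathlib
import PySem

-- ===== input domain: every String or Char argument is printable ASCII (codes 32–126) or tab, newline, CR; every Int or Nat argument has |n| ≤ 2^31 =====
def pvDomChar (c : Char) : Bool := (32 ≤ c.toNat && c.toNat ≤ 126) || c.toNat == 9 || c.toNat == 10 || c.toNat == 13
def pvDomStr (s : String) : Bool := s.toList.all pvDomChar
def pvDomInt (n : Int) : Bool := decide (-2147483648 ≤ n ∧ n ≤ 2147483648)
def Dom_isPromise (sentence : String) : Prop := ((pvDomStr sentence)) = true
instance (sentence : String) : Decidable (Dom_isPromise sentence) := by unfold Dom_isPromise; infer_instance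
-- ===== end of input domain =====

-- B merges A's two passes (find last keyword index, then scan the suffix for a connector)
-- into one right-to-left scan with an early exit; objective: alternative single-pass decomposition.

-- ===== PORT A =====
def pvBestPromiseWords : List String := ["proposed", "promised", "threatened", "guaranteed", "sweared"]
def pvSaidWords : List String := ["told", "said"]

-- split(' ') with a nonempty separator never raises, so split? is always `some`; getD [] is unreachable
def pvTokens (sentence : String) : List String :=
  (PySem.Str.split? (PySem.Str.strip (PySem.Str.lower sentence)) " ").getD []

def isPromise (sentence : String) : Bool :=
  let sentence' := pvTokens sentence
  let pi := sentence'.foldl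
    (fun (pi : Int × Int) word =>
      (if (pvBestPromiseWords ++ pvSaidWords).contains word then pi.2 else pi.1, pi.2 + 1))
    (-1, 0)
  if pi.1 = -1 then false
  else
    let suffix := PySem.List.slice sentence' (some pi.1) none
    if suffix.contains "to" || suffix.contains "that" || suffix.contains "would" then true
    else false

-- ===== PORT B =====
def pvScanB (keywords connectors : PySem.Set String) : List String → Bool → Bool
  | [], _ => false
  | word :: rest, seen =>
    let seen' := if connectors.contains word then true else seen
    if keywords.contains word then seen' else pvScanB keywords connectors rest seen'

def isPromise_alt (sentence : String) : Bool :=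
  let keywords : PySem.Set String := PySem.Set.ofList (pvBestPromiseWords ++ pvSaidWords)
  let connectors : PySem.Set String := PySem.Set.ofList ["to", "that", "would"]
  pvScanB keywords connectors (pvTokens sentence).reverse false

-- ===== PRECONDITION & SPEC =====
def Spec_isPromise (sentence : String) (out : Bool) : Prop := out = isPromise_alt sentence
instance (sentence : String) (out : Bool) : Decidable (Spec_isPromise sentence out) := by unfold Spec_isPromise; infer_instance

-- ===== CLAIM (what is proved, stated in full; the proofs are below) =====
def Claim_equal_isPromise : Prop := ∀ (sentence : String), Dom_isPromise sentence → Spec_isPromise sentence (isPromise sentence)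

-- ===== LEMMAS AND PROOFS =====

-- proof-side abbreviations for the two cores, over an arbitrary token list
def pvKw : PySem.Set String := PySem.Set.ofList (pvBestPromiseWords ++ pvSaidWords)
def pvCn : PySem.Set String := PySem.Set.ofList ["to", "that", "would"]

def pvFoldA (l : List String) : Int × Int :=
  l.foldl
    (fun (pi : Int × Int) word =>
      (if (pvBestPromiseWords ++ pvSaidWords).contains word then pi.2 else pi.1, pi.2 + 1))
    (-1, 0)

def pvConnCheck (s : List String) : Bool :=
  s.contains "to" || s.contains "that" || s.contains "would"

def pvACore (l : List String) : Bool :=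
  if (pvFoldA l).1 = -1 then false
  else if pvConnCheck (PySem.List.slice l (some (pvFoldA l).1) none) then true else false

lemma pvScanB_seen (r : List String) (s : Bool) :
    pvScanB pvKw pvCn r s
      = (pvScanB pvKw pvCn r false || (s && r.any (fun w => pvKw.contains w))) := by
  induction r generalizing s with
  | nil => simp [pvScanB]
  | cons w rest ih =>
    cases hk : pvKw.contains w <;> cases hc : pvCn.contains w <;>
      simp only [pvScanB, hk, hc, if_true, if_false, Bool.false_eq_true, 
        List.any_cons, ih (s := s), ih (s := true)] <;>
      cases s <;> simp [Bool.or_comm, Bool.or_left_comm]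

lemma pvCore (l : List String) :
    (pvFoldA l).2 = (l.length : Int) ∧
    (((pvFoldA l).1 = -1 ∧ l.any (fun w => pvKw.contains w) = false) ∨
      (0 ≤ (pvFoldA l).1 ∧ (pvFoldA l).1 < (l.length : Int) ∧
        l.any (fun w => pvKw.contains w) = true)) ∧
    pvACore l = pvScanB pvKw pvCn l.reverse false := by
  induction l using List.reverseRecOn with
  | nil => refine ⟨rfl, Or.inl ⟨rfl, rfl⟩, ?_⟩ ; rfl
  | append_singleton l x ih =>
    obtain ⟨ih1, ih2, ih3⟩ := ih
    have hfold : pvFoldA (l ++ [x]) =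
        (if (pvBestPromiseWords ++ pvSaidWords).contains x then (pvFoldA l).2 else (pvFoldA l).1,
          (pvFoldA l).2 + 1) := by
      simp [pvFoldA, List.foldl_append]
    have hkweq : ((pvBestPromiseWords ++ pvSaidWords).contains x) = pvKw.contains x := by
      rw [show pvKw = pvBestPromiseWords ++ pvSaidWords from by decide, PySem.Set.contains]
    have hrev : (l ++ [x]).reverse = x :: l.reverse := by simp
    cases hkw : pvKw.contains x with
    | true =>
      refine ⟨?_, Or.inr ⟨?_, ?_, ?_⟩, ?_⟩
      · rw [hfold]; simp only [ih1, List.length_append, List.length_cons,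
          List.length_nil]; push_cast; omega
      · rw [hfold]; simp only [hkweq, hkw, if_true, ih1]; positivity
      · rw [hfold]; simp only [hkweq, hkw, if_true, ih1, List.length_append,
          List.length_cons, List.length_nil]; push_cast; omega
      · simp only [List.any_append, List.any_cons, List.any_nil, hkw,
          Bool.or_true, Bool.or_false]
      · rw [hrev]
        have hA : pvACore (l ++ [x]) = pvConnCheck [x] := by
          unfold pvACore
          rw [hfold]
          simp only [hkweq, hkw, if_true, ih1]
          rw [if_neg (by omega)]
          rw [PySem.List.slice_from _ (by omega)]
          have : ((l.length : Int)).toNat = l.length := by omega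
          rw [this, List.drop_left]
          cases pvConnCheck [x] <;> simp
        rw [hA]
        simp only [pvScanB, hkw, if_true]
        rw [show pvConnCheck [x] = pvCn.contains x from by
          rw [show pvCn = ["to", "that", "would"] from by decide, PySem.Set.contains]
          rw [Bool.eq_iff_iff]; simp [pvConnCheck]; tauto]
        cases pvCn.contains x <;> simp
    | false =>
      have hp1 : (pvFoldA (l ++ [x])).1 = (pvFoldA l).1 := by
        rw [hfold]; simp only [hkweq, hkw, Bool.false_eq_true, if_false]
      have hlen : (pvFoldA (l ++ [x])).2 = ((l ++ [x]).length : Int) := by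
        rw [hfold]; simp only [ih1, List.length_append, List.length_cons,
          List.length_nil]; push_cast; omega
      have hany : (l ++ [x]).any (fun w => pvKw.contains w)
          = l.any (fun w => pvKw.contains w) := by
        simp only [List.any_append, List.any_cons, List.any_nil, hkw,
          Bool.or_false]
      have hs' : pvScanB pvKw pvCn ((l ++ [x]).reverse) false
          = (pvScanB pvKw pvCn l.reverse false
              || (pvCn.contains x && l.any (fun w => pvKw.contains w))) := by
        rw [hrev]
        simp only [pvScanB, hkw]
        rw [pvScanB_seen]
        cases hcn : pvCn.contains x <;> simp [List.any_reverse]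
      rcases ih2 with ⟨hp, hno⟩ | ⟨hp0, hplt, hyes⟩
      · refine ⟨hlen, Or.inl ⟨by rw [hp1, hp], by rw [hany, hno]⟩, ?_⟩
        rw [hs', hno]
        have : pvACore (l ++ [x]) = false := by unfold pvACore; rw [hp1, hp]; simp
        rw [this]
        have : pvScanB pvKw pvCn l.reverse false = false := by
          rw [← ih3]; unfold pvACore; rw [hp]; simp
        rw [this]; simp
      · refine ⟨hlen, Or.inr ⟨by rw [hp1]; exact hp0, by rw [hp1]; simp; omega, by rw [hany, hyes]⟩, ?_⟩
        have hslice : PySem.List.slice (l ++ [x]) (some (pvFoldA l).1) none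
            = PySem.List.slice l (some (pvFoldA l).1) none ++ [x] := by
          rw [PySem.List.slice_from _ hp0, PySem.List.slice_from _ hp0,
            List.drop_append_of_le_length (by omega)]
        have hccA : pvConnCheck (PySem.List.slice (l ++ [x]) (some (pvFoldA l).1) none)
            = (pvConnCheck (PySem.List.slice l (some (pvFoldA l).1) none) || pvConnCheck [x]) := by
          rw [hslice, Bool.eq_iff_iff]; simp [pvConnCheck]; tauto
        have hcx : pvConnCheck [x] = pvCn.contains x := by
          rw [show pvCn = ["to", "that", "would"] from by decide, PySem.Set.contains]
          rw [Bool.eq_iff_iff]; simp [pvConnCheck]; tauto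
        have hAl : pvACore l
            = pvConnCheck (PySem.List.slice l (some (pvFoldA l).1) none) := by
          unfold pvACore
          rw [if_neg (by omega)]
          cases pvConnCheck (PySem.List.slice l (some (pvFoldA l).1) none) <;> simp
        have hAx : pvACore (l ++ [x])
            = (pvConnCheck (PySem.List.slice l (some (pvFoldA l).1) none)
                || pvCn.contains x) := by
          unfold pvACore
          rw [hp1, if_neg (by omega), hccA, hcx]
          cases pvConnCheck (PySem.List.slice l (some (pvFoldA l).1) none) <;>
            cases pvCn.contains x <;> simp
        rw [hs', hyes, ← ih3, hAl, hAx]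
        cases pvConnCheck (PySem.List.slice l (some (pvFoldA l).1) none) <;>
          cases pvCn.contains x <;> simp

-- ===== VERDICT (by name: the statement is the Claim_ definition above) =====
theorem isPromise_spec : Claim_equal_isPromise := by
  intro sentence _
  unfold Spec_isPromise isPromise isPromise_alt
  exact (pvCore (pvTokens sentence)).2.2
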